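-- pv_equiv track=rewrite | github.com/santisoler/adventofcode-2023 | day-13-python/main.py | find_symmetry_plane
-- ===== SOURCE A (Python) =====
-- def is_palindrome(sequence) -> bool:
--     """Check if the given sequence is a palyndrome."""
--     # Check sequence has even number of elements
--     if len(sequence) % 2 != 0:
--         raise ValueError("Sequence with odd number of elements")
--     return _is_palindrome(sequence)
--
-- def _is_palindrome(sequence):
--     """Recursive function to check if a given sequence is a palindrome."""
--     if len(sequence) == 2:
--         return sequence[0] == sequence[1]
--     if sequence[0] != sequence[-1]:
--         return False
--     return _is_palindrome(sequence[1:-1])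
--
-- def find_symmetry_plane(pattern, vertical=True) -> int | None:
--     if not vertical:
--         pattern = transpose(pattern)
--
--     length = len(pattern[0])
--     planes = [i for i in range(1, length)]
--
--     for row in pattern:
--         if not planes:
--             break
--         i = 0
--         while i < len(planes):
--             plane = planes.pop(i)
--             start, end = get_start_end(plane, length)
--             if is_palindrome(row[start:end]):
--                 planes.insert(i, plane)
--                 i += 1
--
--     if not planes:
--         return None
--     if len(planes) > 1:
--         raise ValueError(f"Encountered several symmetry planes: '{planes}'")
--     return planes[0]
--
-- def transpose(array: list[list]) -> list[list]:
--     return [list(x) for x in zip(*array)]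
--
-- def get_start_end(plane: int, length: int) -> tuple[int, int]:
--     if plane == 0:
--         raise ValueError("Invalid plane zero")
--     if plane == length:
--         raise ValueError(f"Invalid plane {plane}")
--     delta = min(plane, length - plane)
--     start = plane - delta
--     end = plane + delta
--     return start, end
-- ===== SOURCE B (Python) =====
-- def find_symmetry_plane(pattern, vertical=True):
--     if not vertical:
--         pattern = ["".join(col) for col in zip(*pattern)]
--     n = len(pattern[0])
--
--     def ok(p):
--         d = min(p, n - p)
--         return all(row[p - d:p + d] == row[p - d:p + d][::-1] for row in pattern)
--
--     planes = [p for p in range(1, n) if ok(p)]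
--     return planes[0] if planes else None
-- ===== Notes on version B (the rewrite author's own statement) =====
-- stated objective: alternative
-- what changed: A prunes a mutable candidate-plane list row by row, testing each surviving plane with a recursive palindrome check that copies a slice at every level; B tests each plane directly with one window-equals-its-reverse slice comparison per row and returns the first surviving plane.
import Mathlib
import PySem

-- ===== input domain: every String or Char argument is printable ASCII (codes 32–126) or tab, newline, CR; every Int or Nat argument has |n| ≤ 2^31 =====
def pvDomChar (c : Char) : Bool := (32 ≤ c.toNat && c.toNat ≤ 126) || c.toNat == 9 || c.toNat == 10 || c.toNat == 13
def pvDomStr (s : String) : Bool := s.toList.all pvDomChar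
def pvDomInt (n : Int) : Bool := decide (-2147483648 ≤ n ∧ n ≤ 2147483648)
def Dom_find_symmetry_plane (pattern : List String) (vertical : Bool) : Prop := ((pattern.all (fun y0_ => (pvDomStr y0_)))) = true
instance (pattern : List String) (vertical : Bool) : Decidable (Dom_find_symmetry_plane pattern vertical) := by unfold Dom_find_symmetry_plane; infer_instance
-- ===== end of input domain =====

-- B replaces A's row-by-row pruning of a mutable candidate-plane list (with a recursive,
-- slice-copying palindrome check) by a direct per-plane test: the window around the plane,
-- clipped to the row, must equal its own reverse.

-- ===== PORT A =====
-- Python `_is_palindrome` (recursive, via slicing).  The `[] => false` guard only makes the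
-- recursion total: Python raises IndexError on an empty sequence, which Pre_ excludes.
def pvAIsPal (s : List Char) : Bool :=
  if h : s = [] then false
  else if s.length == 2 then s.headD ' ' == s.getLastD ' '
  else if s.headD ' ' != s.getLastD ' ' then false
  else pvAIsPal s.tail.dropLast
termination_by s.length
decreasing_by
  cases s with
  | nil => exact absurd rfl h
  | cons a t => simp [List.length_dropLast]

-- Python `transpose` = list(zip(*array)) row by row (zip truncates at the shortest row)
def pvTranspose (xss : List (List Char)) : List (List Char) :=
  if h : xss = [] then []
  else if hne : xss.all (fun r => !r.isEmpty) then
    xss.map (fun r => r.headD ' ') :: pvTranspose (xss.map (fun r => r.tail))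
  else []
termination_by (xss.headD []).length
decreasing_by
  cases xss with
  | nil => exact absurd rfl h
  | cons x t =>
      simp only [List.all_cons, Bool.and_eq_true, Bool.not_eq_eq_eq_not, Bool.not_true] at hne
      simp only [List.headD_cons]
      cases x with
      | nil => simp at hne
      | cons c cs => simp

-- Python `get_start_end` + the slice `row[start:end]` taken in the loop body
def pvSliceFor (row : List Char) (length plane : Int) : List Char :=
  let delta := min plane (length - plane)
  PySem.List.slice row (some (plane - delta)) (some (plane + delta))

-- the Python while-loop with pop/insert keeps, in order, exactly the planes whose slice
-- is a palindrome
def pvALoop (row : List Char) (length : Int) : List Int → List Int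
  | [] => []
  | p :: rest =>
      if pvAIsPal (pvSliceFor row length p) then p :: pvALoop row length rest
      else pvALoop row length rest

def find_symmetry_plane (pattern : List String) (vertical : Bool) : Option Int :=
  let pat : List (List Char) :=
    if vertical then pattern.map String.toList else pvTranspose (pattern.map String.toList)
  let length : Int := ((pat.headD []).length : Int)   -- pattern[0] raises IndexError on []; Pre_ excludes
  let planes := PySem.List.pyRange 1 length 1
  let final := pat.foldl (fun pl row => if pl.isEmpty then pl else pvALoop row length pl) planes
  match final with
  | [] => none
  | [p] => some p
  | _ => none   -- Python raises ValueError ("several symmetry planes"); Pre_ excludes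

-- ===== PORT B =====
-- Source B's window row[p-d:p+d] around plane p
def pvWinB (row : List Char) (n p : Int) : List Char :=
  let d := min p (n - p)
  PySem.List.slice row (some (p - d)) (some (p + d))

-- Source B's ok(p): every row's window reads the same reversed (w[::-1], cf. slice?_none_none_neg_one)
def pvBOk (pat : List (List Char)) (n p : Int) : Bool :=
  pat.all (fun row => pvWinB row n p == (pvWinB row n p).reverse)

-- Source B transposes with the same zip(*pattern) builtin as A; the ports share pvTranspose
def find_symmetry_plane_alt (pattern : List String) (vertical : Bool) : Option Int :=
  let pat : List (List Char) :=
    if vertical then pattern.map String.toList else pvTranspose (pattern.map String.toList)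
  let n : Int := ((pat.headD []).length : Int)
  ((PySem.List.pyRange 1 n 1).filter (fun p => pvBOk pat n p)).head?

-- ===== PRECONDITION & SPEC =====
-- spec-level clipped window around plane p and palindrome test (closed form on the input)
def pvWinP (row : List Char) (n p : Nat) : List Char :=
  (row.drop (p - min p (n - p))).take (2 * min p (n - p))

def pvPalP (x : List Char) : Bool := x == x.reverse

-- length of the shortest row (zip(*) truncates there)
def pvMinLen : List (List Char) → Nat
  | [] => 0
  | [r] => r.length
  | r :: s :: t => min r.length (pvMinLen (s :: t))

-- plane p is a symmetry plane: every row's window is a palindrome (vertical), resp. the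
-- mirrored rows agree on the first pvMinLen columns (horizontal, where zip truncates)
def pvValidPlaneB (pattern : List String) (vertical : Bool) (p : Nat) : Bool :=
  if vertical then
    pattern.all (fun row => pvPalP (pvWinP row.toList (pattern.headD "").toList.length p))
  else
    (List.range (min p (pattern.length - p))).all (fun k =>
      (List.range (pvMinLen (pattern.map String.toList))).all (fun c =>
        (pattern.getD (p - 1 - k) "").toList.getD c ' ' ==
          (pattern.getD (p + k) "").toList.getD c ' '))

-- Pre_ is exactly the inputs on which A returns: the pattern is nonempty (else pattern[0]
-- raises IndexError), every window A actually reaches (plane still alive) has positive even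
-- length (else is_palindrome raises ValueError/IndexError), for vertical=False the shortest
-- row is nonempty (else the transpose is empty and pattern[0] raises), and at most one plane
-- survives (on several, A raises ValueError).
def Pre_find_symmetry_plane (pattern : List String) (vertical : Bool) : Prop :=
  pattern ≠ [] ∧
  (vertical = true → ∀ r < pattern.length, ∀ p < (pattern.headD "").toList.length, 1 ≤ p →
      ((pattern.take r).all (fun row =>
          pvPalP (pvWinP row.toList (pattern.headD "").toList.length p))) = true →
      ((pvWinP (pattern.getD r "").toList (pattern.headD "").toList.length p).length % 2 = 0 ∧
        pvWinP (pattern.getD r "").toList (pattern.headD "").toList.length p ≠ [])) ∧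
  (vertical = false → pvMinLen (pattern.map String.toList) ≠ 0) ∧
  ((List.range (if vertical then (pattern.headD "").toList.length else pattern.length)).filter
      (fun p => decide (0 < p) && pvValidPlaneB pattern vertical p)).length ≤ 1

instance (pattern : List String) (vertical : Bool) : Decidable (Pre_find_symmetry_plane pattern vertical) := by
  unfold Pre_find_symmetry_plane; infer_instance

def pvWitness_find_symmetry_plane : List String × Bool := (["#..##..#", ".##..##.", "#.#..#.#"], true)

def Spec_find_symmetry_plane (pattern : List String) (vertical : Bool) (out : Option Int) : Prop := out = find_symmetry_plane_alt pattern vertical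
instance (pattern : List String) (vertical : Bool) (out : Option Int) : Decidable (Spec_find_symmetry_plane pattern vertical out) := by unfold Spec_find_symmetry_plane; infer_instance

-- ===== CLAIM (what is proved, stated in full; the proofs are below) =====
def Claim_equal_find_symmetry_plane : Prop := ∀ (pattern : List String) (vertical : Bool), Dom_find_symmetry_plane pattern vertical → Pre_find_symmetry_plane pattern vertical → Spec_find_symmetry_plane pattern vertical (find_symmetry_plane pattern vertical)

-- ===== LEMMAS AND PROOFS =====

-- A's inner while-loop (pop, test, re-insert) keeps exactly the palindromic planes: a filter
lemma pvALoop_eq_filter (row : List Char) (L : Int) (pl : List Int) :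
    pvALoop row L pl = pl.filter (fun p => pvAIsPal (pvSliceFor row L p)) := by
  induction pl with
  | nil => rfl
  | cons p rest ih =>
      rw [pvALoop, List.filter_cons]
      by_cases h : pvAIsPal (pvSliceFor row L p) <;> simp [h, ih]

-- A's outer row loop is a filter by "palindromic in every row"
lemma pvFoldl_eq_filter (L : Int) (pat : List (List Char)) (pl : List Int) :
    pat.foldl (fun pl row => if pl.isEmpty then pl else pvALoop row L pl) pl
      = pl.filter (fun p => pat.all (fun row => pvAIsPal (pvSliceFor row L p))) := by
  induction pat generalizing pl with
  | nil => simp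
  | cons row pat ih =>
      have hstep : (if pl.isEmpty then pl else pvALoop row L pl)
          = pl.filter (fun p => pvAIsPal (pvSliceFor row L p)) := by
        by_cases h : pl.isEmpty
        · have : pl = [] := by simpa using h
          simp [this]
        · simp [h, pvALoop_eq_filter]
      rw [List.foldl_cons, hstep, ih, List.filter_filter]
      apply List.filter_congr
      intro p _
      rw [List.all_cons, Bool.and_comm]

lemma pvAIsPal_two (a b : Char) : pvAIsPal [a, b] = (a == b) := by
  rw [pvAIsPal]; simp

lemma pvAIsPal_step (a b : Char) (m : List Char) (hm : m ≠ []) :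
    pvAIsPal (a :: (m ++ [b])) = (if a = b then pvAIsPal m else false) := by
  have hcons : a :: (m ++ [b]) = (a :: m) ++ [b] := by simp
  rw [pvAIsPal]
  rw [dif_neg (by simp : ¬(a :: (m ++ [b]) = []))]
  have hlen : ((a :: (m ++ [b])).length == 2) = false := by
    have h0 : m.length ≠ 0 := fun h => hm (List.length_eq_zero_iff.mp h)
    simp only [List.length_cons, List.length_append]
    rw [beq_eq_false_iff_ne]
    omega
  rw [hlen]
  rw [if_neg Bool.false_ne_true]
  have hlast : (a :: (m ++ [b])).getLastD ' ' = b := by rw [hcons, List.getLastD_concat]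
  have htail : (a :: (m ++ [b])).tail.dropLast = m := by
    rw [List.tail_cons, List.dropLast_concat]
  rw [List.headD_cons, hlast, htail]
  by_cases hab : a = b
  · simp [hab]
  · simp [hab]

-- the recursive palindrome check accepts u ++ v exactly when u is the reverse of v
lemma pvAIsPal_append_iff : ∀ (u v : List Char), u.length = v.length → u ≠ [] →
    (pvAIsPal (u ++ v) = true ↔ u = v.reverse) := by
  intro u
  induction u with
  | nil => intro v _ hne; exact absurd rfl hne
  | cons a u ih =>
      intro v hlen _
      rcases v.eq_nil_or_concat with rfl | ⟨v', b, rfl⟩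
      · simp at hlen
      · simp only [List.concat_eq_append] at hlen ⊢
        have hlen' : u.length = v'.length := by
          simp at hlen
          omega
        cases u with
        | nil =>
            have hv' : v' = [] := List.length_eq_zero_iff.mp (by simpa using hlen'.symm)
            subst hv'
            show pvAIsPal ([a] ++ [b]) = true ↔ _
            rw [(by simp : [a] ++ [b] = [a, b]), pvAIsPal_two]
            simp
        | cons c u' =>
            have hm : c :: u' ++ v' ≠ [] := by simp
            have harr : (a :: c :: u') ++ (v' ++ [b]) = a :: ((c :: u' ++ v') ++ [b]) := by simp
            rw [harr, pvAIsPal_step a b _ hm]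
            by_cases hab : a = b
            · rw [if_pos hab]
              rw [ih v' hlen' (by simp)]
              simp [hab, List.reverse_append]
            · rw [if_neg hab]
              simp [List.reverse_append, hab]

-- u ++ v is its own reverse iff u is the reverse of v (for equal lengths)
lemma pvAppend_palindrome_iff (u v : List Char) (hlen : u.length = v.length) :
    (u ++ v = (u ++ v).reverse) ↔ u = v.reverse := by
  rw [List.reverse_append]
  constructor
  · intro h
    exact (List.append_inj h (by simp [hlen])).1
  · intro h
    rw [h]
    simp

-- on an even nonempty list, A's recursive palindrome check is "equals its own reverse"
lemma pvAIsPal_even (s : List Char) (hlen : s.length % 2 = 0) (hne : s ≠ []) :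
    pvAIsPal s = (s == s.reverse) := by
  have hpos : 0 < s.length := List.length_pos_of_ne_nil hne
  have hs : s.take (s.length / 2) ++ s.drop (s.length / 2) = s := List.take_append_drop _ s
  have hul : (s.take (s.length / 2)).length = s.length / 2 := by
    rw [List.length_take]; omega
  have hvl : (s.drop (s.length / 2)).length = s.length / 2 := by
    rw [List.length_drop]; omega
  have hune : s.take (s.length / 2) ≠ [] := by
    intro h
    rw [h] at hul
    simp at hul
    omega
  conv_lhs => rw [← hs]
  conv_rhs => rw [← hs]
  rw [Bool.eq_iff_iff, pvAIsPal_append_iff _ _ (hul.trans hvl.symm) hune, beq_iff_eq]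
  exact (pvAppend_palindrome_iff _ _ (hul.trans hvl.symm)).symm

-- the Int-slice window of both ports equals the spec-level Nat window
lemma pvWin_natCast (row : List Char) (n p : Nat) (hp1 : 1 ≤ p) (hpn : p < n) :
    pvSliceFor row (n:Int) (p:Int) = pvWinP row n p := by
  have hd : min (p:Int) ((n:Int) - (p:Int)) = ((min p (n - p) : Nat) : Int) := by
    push_cast; omega
  show PySem.List.slice row (some ((p:Int) - min (p:Int) ((n:Int) - (p:Int))))
      (some ((p:Int) + min (p:Int) ((n:Int) - (p:Int)))) = _
  rw [hd]
  set d := min p (n - p) with hdd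
  have hdp : d ≤ p := hdd ▸ Nat.min_le_left _ _
  have h1 : (p:Int) - ((d:Nat):Int) = (((p - d : Nat)):Int) := (Nat.cast_sub hdp).symm
  have h2 : (p:Int) + ((d:Nat):Int) = (((p + d : Nat)):Int) := by push_cast; ring
  rw [h1, h2, PySem.List.slice_natCast]
  unfold pvWinP
  rw [← hdd]
  congr 1
  omega

lemma pvWinB_eq (row : List Char) (n p : Int) : pvWinB row n p = pvSliceFor row n p := rfl

-- the window splits at the plane into two halves of length d
lemma pvWinP_split (row : List Char) (n p : Nat) :
    pvWinP row n p
      = ((row.drop (p - min p (n - p))).take (min p (n - p)))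
          ++ ((row.drop p).take (min p (n - p))) := by
  unfold pvWinP
  set d := min p (n - p) with hdd
  have hdp : d ≤ p := hdd ▸ Nat.min_le_left _ _
  have h2 : 2 * d = d + d := by omega
  rw [h2, List.take_add, List.drop_drop, Nat.sub_add_cancel hdp]

-- "left half = reverse of right half" is the positional mirror condition at plane p
lemma pvEqRev_iff (row : List Char) (w p : Nat) (hp1 : 1 ≤ p) (hpw : p < w)
    (hrow : row.length = w) :
    ((row.drop (p - min p (w - p))).take (min p (w - p))
        = ((row.drop p).take (min p (w - p))).reverse)
      ↔ ∀ k < min p (w - p), row[p - 1 - k]? = row[p + k]? := by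
  set d := min p (w - p) with hdd
  have hdp : d ≤ p := by omega
  have hdwp : d ≤ w - p := by omega
  have hulen : ((row.drop (p - d)).take d).length = d := by
    simp [hrow]; omega
  have hvlen : ((row.drop p).take d).length = d := by
    simp [hrow]; omega
  have hu : ∀ j < d, ((row.drop (p - d)).take d)[j]? = row[p - d + j]? := by
    intro j hj
    simp [hj]
  have hv : ∀ j < d, ((row.drop p).take d)[j]? = row[p + j]? := by
    intro j hj
    simp [hj]
  have hrev : ∀ j < d, (((row.drop p).take d).reverse)[j]? = row[p + (d - 1 - j)]? := by
    intro j hj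
    have hj' : j < ((row.drop p).take d).length := by rw [hvlen]; exact hj
    rw [List.getElem?_reverse hj', hvlen]
    exact hv _ (by omega)
  constructor
  · intro h k hk
    have := congrArg (fun l => l[d - 1 - k]?) h
    simp only at this
    rw [hu _ (by omega), hrev _ (by omega)] at this
    have e1 : p - d + (d - 1 - k) = p - 1 - k := by omega
    have e2 : d - 1 - (d - 1 - k) = k := by omega
    rw [e1, e2] at this
    exact this
  · intro h
    apply List.ext_getElem?
    intro j
    by_cases hj : j < d
    · rw [hu _ hj, hrev _ hj]
      have e1 : p - d + j = p - 1 - (d - 1 - j) := by omega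
      rw [e1]
      exact h _ (by omega)
    · have h1 : ((row.drop (p - d)).take d)[j]? = none := by
        rw [List.getElem?_eq_none_iff]; omega
      have h2 : (((row.drop p).take d).reverse)[j]? = none := by
        rw [List.getElem?_eq_none_iff]; simp [hvlen]; omega
      rw [h1, h2]

-- an unclipped window is a palindrome iff the positional mirror condition holds
lemma pvSegRev_iff (cl : List Char) (R p : Nat) (hp1 : 1 ≤ p) (hpR : p < R)
    (hlen : cl.length = R) :
    (pvWinP cl R p = (pvWinP cl R p).reverse) ↔ ∀ k < min p (R - p), cl[p - 1 - k]? = cl[p + k]? := by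
  have hulen : ((cl.drop (p - min p (R - p))).take (min p (R - p))).length = min p (R - p) := by
    simp [hlen]; omega
  have hvlen : ((cl.drop p).take (min p (R - p))).length = min p (R - p) := by
    simp [hlen]
  rw [pvWinP_split, pvAppend_palindrome_iff _ _ (hulen.trans hvlen.symm)]
  exact pvEqRev_iff cl R p hp1 hpR hlen

lemma pvAll_congr {α : Type} (l : List α) (f g : α → Bool) (h : ∀ x ∈ l, f x = g x) :
    l.all f = l.all g := by
  induction l with
  | nil => rfl
  | cons a t ih =>
      rw [List.all_cons, List.all_cons, h a (by simp), ih (fun x hx => h x (by simp [hx]))]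

-- A's conjunction over the rows equals B's, given every reached window is even and nonempty
lemma pvConj_eq (win : List Char → List Char) : ∀ (rows : List (List Char)),
    (∀ r < rows.length,
      ((rows.take r).all (fun row => win row == (win row).reverse)) = true →
      ((win (rows.getD r [])).length % 2 = 0 ∧ win (rows.getD r []) ≠ [])) →
    rows.all (fun row => pvAIsPal (win row)) = rows.all (fun row => win row == (win row).reverse) := by
  intro rows
  induction rows with
  | nil => intro _; rfl
  | cons row rest ih =>
      intro hreach
      have h0 := hreach 0 (by simp) (by simp)
      simp only [List.getD_cons_zero] at h0
      have hhead : pvAIsPal (win row) = (win row == (win row).reverse) :=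
        pvAIsPal_even _ h0.1 h0.2
      rw [List.all_cons, List.all_cons, hhead]
      cases hB : (win row == (win row).reverse)
      · simp
      · simp only [Bool.true_and]
        apply ih
        intro r hr htake
        have := hreach (r + 1) (by simpa using Nat.succ_lt_succ hr)
          (by simpa [List.take_succ_cons, hB] using htake)
        simpa using this

-- pvMinLen is a lower bound on every row length
lemma pvMinLen_le : ∀ (xss : List (List Char)), ∀ r ∈ xss, pvMinLen xss ≤ r.length := by
  intro xss
  induction xss with
  | nil => intro r hr; simp at hr
  | cons x t ih =>
      intro r hr
      cases t with
      | nil =>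
          simp at hr
          simp [pvMinLen, hr]
      | cons y s =>
          rw [List.mem_cons] at hr
          rcases hr with rfl | hr
          · exact min_le_left _ _
          · exact le_trans (min_le_right _ _) (ih r hr)

-- pvMinLen is attained
lemma pvMinLen_exists : ∀ (xss : List (List Char)), xss ≠ [] →
    ∃ r ∈ xss, r.length = pvMinLen xss := by
  intro xss
  induction xss with
  | nil => intro h; exact absurd rfl h
  | cons x t ih =>
      intro _
      cases t with
      | nil => exact ⟨x, by simp, by simp [pvMinLen]⟩
      | cons y s =>
          obtain ⟨r, hr, hlr⟩ := ih (by simp)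
          by_cases h : x.length ≤ pvMinLen (y :: s)
          · exact ⟨x, by simp, by simp [pvMinLen]; omega⟩
          · refine ⟨r, by simp [hr], ?_⟩
            simp [pvMinLen]
            omega

lemma pvMinLen_tail_map : ∀ (xss : List (List Char)), (∀ r ∈ xss, r ≠ []) →
    pvMinLen (xss.map List.tail) = pvMinLen xss - 1 := by
  intro xss
  induction xss with
  | nil => intro _; rfl
  | cons x t ih =>
      intro hall
      cases t with
      | nil => simp [pvMinLen, List.length_tail]
      | cons y s =>
          have hx : x ≠ [] := hall x (by simp)
          have hy : y ≠ [] := hall y (by simp)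
          have hxl : 1 ≤ x.length := by
            cases x with
            | nil => exact absurd rfl hx
            | cons a b => simp
          have ht := ih (fun r hr => hall r (by simp [hr]))
          show min x.tail.length (pvMinLen ((y :: s).map List.tail)) = _
          rw [ht, List.length_tail]
          show min (x.length - 1) (pvMinLen (y :: s) - 1) = min x.length (pvMinLen (y :: s)) - 1
          omega

-- zip(*xss) described by columns: the transpose has pvMinLen xss rows, row c being column c
lemma pvTranspose_minLen : ∀ (m : Nat) (xss : List (List Char)), xss ≠ [] → pvMinLen xss = m →
    pvTranspose xss = (List.range m).map (fun c => xss.map (fun r => r.getD c ' ')) := by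
  intro m
  induction m with
  | zero =>
      intro xss hne hm
      rw [pvTranspose, dif_neg hne]
      obtain ⟨r, hr, hlr⟩ := pvMinLen_exists xss hne
      have hre : r = [] := by
        apply List.length_eq_zero_iff.mp
        omega
      have hfalse : ¬ ((xss.all fun r => !r.isEmpty) = true) := by
        rw [List.all_eq_true]
        intro hcon
        have := hcon r hr
        rw [hre] at this
        simp at this
      rw [dif_neg hfalse]
      simp
  | succ k ih =>
      intro xss hne hm
      have hall : ∀ r ∈ xss, r ≠ [] := by
        intro r hr hcon
        have := pvMinLen_le xss r hr
        rw [hcon] at this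
        simp at this
        omega
      have hallb : (xss.all fun r => !r.isEmpty) = true := by
        rw [List.all_eq_true]
        intro r hr
        have := hall r hr
        cases r with
        | nil => exact absurd rfl this
        | cons a b => simp
      rw [pvTranspose, dif_neg hne, dif_pos hallb]
      have htne : xss.map List.tail ≠ [] := by simpa using hne
      rw [ih (xss.map List.tail) htne (by rw [pvMinLen_tail_map xss hall, hm]; omega)]
      rw [List.range_succ_eq_map, List.map_cons]
      congr 1
      · apply List.map_congr_left
        intro r _
        cases r <;> simp
      · conv_rhs => rw [List.map_map]
        apply List.map_congr_left
        intro c _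
        simp only [Function.comp_apply, List.map_map]
        apply List.map_congr_left
        intro r _
        cases r <;> simp [Nat.succ_eq_add_one]

-- counting the accepted planes in 1..n-1 equals Pre_'s count over range n
lemma pvFilterRange_len (n : Nat) (F : Int → Bool) (G : Nat → Bool)
    (h : ∀ p : Nat, 1 ≤ p → p < n → F (p:Int) = G p) :
    ((PySem.List.pyRange 1 (n:Int) 1).filter F).length
      = ((List.range n).filter (fun p => decide (0 < p) && G p)).length := by
  rw [PySem.List.pyRange_one]
  have hn : ((n:Int) - 1).toNat = n - 1 := by omega
  rw [hn, List.filter_map, List.length_map]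
  cases n with
  | zero => simp
  | succ m =>
      rw [List.range_succ_eq_map, List.filter_cons]
      have h0 : (decide (0 < 0) && G 0) = false := by simp
      rw [h0]
      simp only [Nat.add_sub_cancel, Bool.false_eq_true, if_false]
      rw [List.filter_map, List.length_map]
      congr 1
      apply List.filter_congr
      intro k hk
      have hk' : k < m := List.mem_range.mp hk
      have e : (1:Int) + (k:Int) = ((1 + k : Nat):Int) := by push_cast; ring
      rw [Function.comp_apply, Function.comp_apply, e, h (1 + k) (by omega) (by omega)]
      have e2 : Nat.succ k = 1 + k := by omega
      rw [e2, Nat.add_comm 1 k]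
      simp

-- the final match of A against the head? of B, under "at most one plane"
lemma pvMatch_eq_head (l : List Int) :
    l.length ≤ 1 →
    (match l with
      | [] => (none : Option Int)
      | [p] => some p
      | _ => none) = l.head? := by
  intro hlen
  cases l with
  | nil => rfl
  | cons a t =>
      cases t with
      | nil => rfl
      | cons b t2 => simp at hlen

-- B's per-plane test over an arbitrary row list, as the spec-level window test
lemma pvBOk_eq_winP (pat : List (List Char)) (n p : Nat) (hp1 : 1 ≤ p) (hpn : p < n) :
    pvBOk pat (n:Int) (p:Int) = pat.all (fun row => pvPalP (pvWinP row n p)) := by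
  apply pvAll_congr
  intro row _
  rw [pvWinB_eq, pvWin_natCast row n p hp1 hpn]
  rfl

-- A's per-plane test equals B's, given every reached window is even and nonempty
lemma pvAB_plane_eq (pat : List (List Char)) (n p : Nat) (hp1 : 1 ≤ p) (hpn : p < n)
    (hreach : ∀ r < pat.length,
      ((pat.take r).all (fun row => pvPalP (pvWinP row n p))) = true →
      ((pvWinP (pat.getD r []) n p).length % 2 = 0 ∧ pvWinP (pat.getD r []) n p ≠ [])) :
    (pat.all fun row => pvAIsPal (pvSliceFor row (n:Int) (p:Int))) = pvBOk pat (n:Int) (p:Int) := by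
  rw [pvBOk_eq_winP pat n p hp1 hpn]
  have hwin : ∀ row ∈ pat, pvSliceFor row (n:Int) (p:Int) = pvWinP row n p := by
    intro row _
    exact pvWin_natCast row n p hp1 hpn
  rw [pvAll_congr pat _ (fun row => pvAIsPal (pvWinP row n p))
    (fun row hr => by rw [hwin row hr])]
  exact pvConj_eq (fun row => pvWinP row n p) pat hreach

-- ===== VERDICT is at the very bottom; the two main cases first =====
lemma pvMain_vert (pattern : List String) (hne : pattern ≠ [])
    (hreach : ∀ r < pattern.length, ∀ p < (pattern.headD "").toList.length, 1 ≤ p →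
      ((pattern.take r).all (fun row =>
          pvPalP (pvWinP row.toList (pattern.headD "").toList.length p))) = true →
      ((pvWinP (pattern.getD r "").toList (pattern.headD "").toList.length p).length % 2 = 0 ∧
        pvWinP (pattern.getD r "").toList (pattern.headD "").toList.length p ≠ []))
    (huniq : ((List.range ((pattern.headD "").toList.length)).filter
        (fun p => decide (0 < p) && pvValidPlaneB pattern true p)).length ≤ 1) :
    find_symmetry_plane pattern true = find_symmetry_plane_alt pattern true := by
  have hhead : (pattern.map String.toList).headD [] = (pattern.headD "").toList := by
    cases pattern with
    | nil => exact absurd rfl hne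
    | cons s t => simp
  simp only [find_symmetry_plane, find_symmetry_plane_alt, if_true]
  rw [hhead, pvFoldl_eq_filter]
  have hmapreach : ∀ (p : Nat), p < (pattern.headD "").toList.length → 1 ≤ p →
      ∀ r < (pattern.map String.toList).length,
      (((pattern.map String.toList).take r).all (fun row =>
          pvPalP (pvWinP row (pattern.headD "").toList.length p))) = true →
      ((pvWinP ((pattern.map String.toList).getD r []) (pattern.headD "").toList.length p).length % 2 = 0 ∧
        pvWinP ((pattern.map String.toList).getD r []) (pattern.headD "").toList.length p ≠ []) := by
    intro p hpn hp1 r hr htake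
    have hr' : r < pattern.length := by simpa using hr
    have hgd : (pattern.map String.toList).getD r [] = (pattern.getD r "").toList := by
      rw [List.getD_eq_getElem _ _ (by simpa using hr'), List.getD_eq_getElem _ _ hr']
      simp
    rw [hgd] at *
    refine hreach r hr' p hpn hp1 ?_
    rw [← List.map_take] at htake
    rw [List.all_map] at htake
    exact htake
  have hbridge : ∀ p ∈ PySem.List.pyRange 1 (((pattern.headD "").toList.length : Nat) : Int) 1,
      ((pattern.map String.toList).all fun row =>
          pvAIsPal (pvSliceFor row ((pattern.headD "").toList.length : Int) p))
        = pvBOk (pattern.map String.toList) ((pattern.headD "").toList.length : Int) p := by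
    intro p hp
    obtain ⟨hp1, hpw⟩ := PySem.List.mem_pyRange_one.mp hp
    have hc : ((p.toNat : Nat) : Int) = p := Int.toNat_of_nonneg (by omega)
    rw [← hc]
    exact pvAB_plane_eq (pattern.map String.toList) _ p.toNat (by omega) (by omega)
      (fun r hr htake => hmapreach p.toNat (by omega) (by omega) r hr htake)
  rw [List.filter_congr hbridge]
  apply pvMatch_eq_head
  rw [pvFilterRange_len ((pattern.headD "").toList.length)
    (fun p => pvBOk (pattern.map String.toList) ((pattern.headD "").toList.length : Int) p)
    (fun p => pvValidPlaneB pattern true p)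
    (fun p hp1 hpw => by
      show pvBOk (pattern.map String.toList) ((pattern.headD "").toList.length : Int) (p : Int)
        = pvValidPlaneB pattern true p
      rw [pvBOk_eq_winP _ _ p hp1 hpw, List.all_map]
      unfold pvValidPlaneB
      rw [if_pos rfl]
      rfl)]
  exact huniq

lemma pvMain_horiz (pattern : List String) (hne : pattern ≠ [])
    (hm0 : pvMinLen (pattern.map String.toList) ≠ 0)
    (huniq : ((List.range pattern.length).filter
        (fun p => decide (0 < p) && pvValidPlaneB pattern false p)).length ≤ 1) :
    find_symmetry_plane pattern false = find_symmetry_plane_alt pattern false := by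
  have hxne : pattern.map String.toList ≠ [] := by simpa using hne
  have hT := pvTranspose_minLen (pvMinLen (pattern.map String.toList))
    (pattern.map String.toList) hxne rfl
  obtain ⟨m', hm'⟩ : ∃ m', pvMinLen (pattern.map String.toList) = m' + 1 :=
    ⟨pvMinLen (pattern.map String.toList) - 1, by omega⟩
  have hcollen : ∀ cl ∈ pvTranspose (pattern.map String.toList), cl.length = pattern.length := by
    intro cl hcl
    rw [hT] at hcl
    simp only [List.mem_map] at hcl
    obtain ⟨c, _, rfl⟩ := hcl
    simp
  simp only [find_symmetry_plane, find_symmetry_plane_alt, Bool.false_eq_true, if_false]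
  have hhead : ((pvTranspose (pattern.map String.toList)).headD []).length = pattern.length := by
    rw [hT, hm', List.range_succ_eq_map, List.map_cons, List.headD_cons]
    simp
  rw [hhead, pvFoldl_eq_filter]
  have hreach : ∀ (p : Nat), 1 ≤ p → p < pattern.length →
      ∀ r < (pvTranspose (pattern.map String.toList)).length,
      (((pvTranspose (pattern.map String.toList)).take r).all (fun row =>
          pvPalP (pvWinP row pattern.length p))) = true →
      ((pvWinP ((pvTranspose (pattern.map String.toList)).getD r []) pattern.length p).length % 2 = 0 ∧
        pvWinP ((pvTranspose (pattern.map String.toList)).getD r []) pattern.length p ≠ []) := by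
    intro p hp1 hpR r hr _
    have hmem : (pvTranspose (pattern.map String.toList)).getD r []
        ∈ pvTranspose (pattern.map String.toList) := by
      rw [List.getD_eq_getElem _ _ hr]
      exact List.getElem_mem hr
    have hlen := hcollen _ hmem
    have hwl : (pvWinP ((pvTranspose (pattern.map String.toList)).getD r []) pattern.length p).length
        = 2 * min p (pattern.length - p) := by
      unfold pvWinP
      rw [List.length_take, List.length_drop, hlen]
      omega
    constructor
    · omega
    · intro hcon
      rw [hcon] at hwl
      simp at hwl
      omega
  have hbridge : ∀ p ∈ PySem.List.pyRange 1 ((pattern.length : Nat) : Int) 1,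
      ((pvTranspose (pattern.map String.toList)).all fun row =>
          pvAIsPal (pvSliceFor row (pattern.length : Int) p))
        = pvBOk (pvTranspose (pattern.map String.toList)) (pattern.length : Int) p := by
    intro p hp
    obtain ⟨hp1, hpR⟩ := PySem.List.mem_pyRange_one.mp hp
    have hc : ((p.toNat : Nat) : Int) = p := Int.toNat_of_nonneg (by omega)
    rw [← hc]
    exact pvAB_plane_eq _ _ p.toNat (by omega) (by omega)
      (fun r hr htake => hreach p.toNat (by omega) (by omega) r hr htake)
  rw [List.filter_congr hbridge]
  apply pvMatch_eq_head
  rw [pvFilterRange_len pattern.length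
    (fun p => pvBOk (pvTranspose (pattern.map String.toList)) (pattern.length : Int) p)
    (fun p => pvValidPlaneB pattern false p)
    (fun p hp1 hpR => by
      show pvBOk (pvTranspose (pattern.map String.toList)) (pattern.length : Int) (p : Int)
        = pvValidPlaneB pattern false p
      rw [pvBOk_eq_winP _ _ p hp1 hpR, hT]
      rw [List.all_map]
      unfold pvValidPlaneB
      simp only [Bool.false_eq_true, if_false]
      rw [Bool.eq_iff_iff]
      simp only [List.all_eq_true, List.mem_range, Function.comp_apply]
      have hidx : ∀ k, k < min p (pattern.length - p) →
          p - 1 - k < pattern.length ∧ p + k < pattern.length := by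
        intro k hk; omega
      have hcol : ∀ c, ∀ i, i < pattern.length →
          ((pattern.map String.toList).map (fun r => r.getD c ' '))[i]?
            = some ((pattern.getD i "").toList.getD c ' ') := by
        intro c i hi
        simp only [List.getElem?_map, List.getElem?_eq_getElem hi, Option.map_some]
        rw [List.getD_eq_getElem _ _ hi]
      constructor
      · intro h k hk c hc
        have hk' : k < min p (pattern.length - p) := by simpa using hk
        obtain ⟨hi, hj⟩ := hidx k hk'
        have hcl : ((pattern.map String.toList).map (fun r => r.getD c ' ')).length
            = pattern.length := by simp
        have := (pvSegRev_iff _ pattern.length p hp1 hpR hcl).mp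
          (by simpa [pvPalP, beq_iff_eq] using h c hc) k hk'
        rw [hcol c _ hi, hcol c _ hj] at this
        simp only [Option.some.injEq] at this
        simpa using this
      · intro h c hc
        have hcl : ((pattern.map String.toList).map (fun r => r.getD c ' ')).length
            = pattern.length := by simp
        have : ∀ k < min p (pattern.length - p),
            ((pattern.map String.toList).map (fun r => r.getD c ' '))[p - 1 - k]?
              = ((pattern.map String.toList).map (fun r => r.getD c ' '))[p + k]? := by
          intro k hk
          obtain ⟨hi, hj⟩ := hidx k hk
          rw [hcol c _ hi, hcol c _ hj]
          have := h k (by simpa using hk) c hc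
          simpa using this
        simpa [pvPalP, beq_iff_eq] using (pvSegRev_iff _ pattern.length p hp1 hpR hcl).mpr this)]
  exact huniq

-- ===== VERDICT (by name: the statement is the Claim_ definition above) =====
theorem find_symmetry_plane_spec : Claim_equal_find_symmetry_plane := by
  intro pattern vertical _ hpre
  obtain ⟨hne, hreach, hm0, huniq⟩ := hpre
  unfold Spec_find_symmetry_plane
  cases vertical with
  | true => exact pvMain_vert pattern hne (hreach rfl) (by simpa using huniq)
  | false => exact pvMain_horiz pattern hne (hm0 rfl) (by simpa using huniq)
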